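-- pv_equiv track=rewrite | github.com/ehjalmar/AoC2023 | Day7/part1.py | check_five_of_a_kind
-- ===== SOURCE A (Python) =====
-- from collections import defaultdict
--
-- def check_five_of_a_kind(hand):
--     values = [i[0] for i in hand]
--     value_counts = defaultdict(lambda:0)
--     for v in values:
--         value_counts[v]+=1
--     if sorted(value_counts.values()) == [5]:
--         return True
--     return False
-- ===== SOURCE B (Python) =====
-- def check_five_of_a_kind(hand):
--     return len(hand) == 5 and all(c[0] == hand[0][0] for c in hand)
-- ===== Notes on version B (the rewrite author's own statement) =====
-- stated objective: simpler
-- what changed: Replaces the frequency-dict accumulation plus sorted(values)==[5] test with a direct single-pass check that the hand has exactly 5 cards and every card value equals the first one (short-circuit keeps the empty hand safe).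
import Mathlib
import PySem

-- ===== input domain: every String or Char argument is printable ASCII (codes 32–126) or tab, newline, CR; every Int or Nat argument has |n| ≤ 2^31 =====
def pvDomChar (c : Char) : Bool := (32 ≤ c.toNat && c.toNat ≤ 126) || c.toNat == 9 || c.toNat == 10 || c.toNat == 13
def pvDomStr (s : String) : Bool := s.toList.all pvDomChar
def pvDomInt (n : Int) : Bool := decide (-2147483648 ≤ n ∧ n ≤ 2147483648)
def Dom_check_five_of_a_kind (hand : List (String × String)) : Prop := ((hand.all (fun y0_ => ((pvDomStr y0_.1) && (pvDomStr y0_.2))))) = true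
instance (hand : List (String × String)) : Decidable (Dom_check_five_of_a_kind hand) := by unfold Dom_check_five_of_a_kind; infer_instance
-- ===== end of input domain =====

-- B replaces A's frequency-dict + sorted(values)==[5] test by a direct one-pass check (length 5 and all values equal the first) — objective: simpler.


-- ===== PORT A =====
-- A: count card values into a defaultdict and test sorted(counts.values()) == [5].
def check_five_of_a_kind (hand : List (String × String)) : Bool :=
  let values := hand.map (fun i => i.1)
  let value_counts := values.foldl (fun d v => d.modify v 0 (· + 1)) PySem.Dict.empty
  if PySem.List.sorted value_counts.values (fun x => x) false = [(5 : Int)] then true else false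

-- ===== PORT B =====
-- B: the hand has exactly 5 cards and every card value equals the first one.
def check_five_of_a_kind_alt (hand : List (String × String)) : Bool :=
  match hand with
  | [] => false
  | h :: _ => hand.length == 5 && hand.all (fun c => c.1 == h.1)

-- ===== PRECONDITION & SPEC =====
def Spec_check_five_of_a_kind (hand : List (String × String)) (out : Bool) : Prop := out = check_five_of_a_kind_alt hand
instance (hand : List (String × String)) (out : Bool) : Decidable (Spec_check_five_of_a_kind hand out) := by unfold Spec_check_five_of_a_kind; infer_instance

-- ===== CLAIM (what is proved, stated in full; the proofs are below) =====
def Claim_equal_check_five_of_a_kind : Prop := ∀ (hand : List (String × String)), Dom_check_five_of_a_kind hand → Spec_check_five_of_a_kind hand (check_five_of_a_kind hand)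

-- ===== LEMMAS AND PROOFS =====

-- ===== VERDICT (by name: the statement is the Claim_ definition above) =====
theorem foldl_add_all_eq {α : Type} [BEq α] [LawfulBEq α] (v : α) (l : List α)
    (h : ∀ x ∈ l, x = v) : List.foldl PySem.Set.add [v] l = [v] := by
  induction l with
  | nil => rfl
  | cons x xs ih =>
    have hx : x = v := h x (by simp)
    subst hx
    have : PySem.Set.add [x] x = [x] := by simp [PySem.Set.add, PySem.Set.contains]
    simpa [this] using ih (fun y hy => h y (by simp [hy]))

theorem ofList_all_eq {α : Type} [BEq α] [LawfulBEq α] (v : α) (l : List α)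
    (h : ∀ x ∈ l, x = v) : PySem.Set.ofList (v :: l) = [v] := by
  have : PySem.Set.ofList (v :: l) = List.foldl PySem.Set.add (PySem.Set.add [] v) l := by
    simp [PySem.Set.ofList_eq_foldl]
  rw [this]
  have hadd : PySem.Set.add ([] : List α) v = [v] := by simp [PySem.Set.add, PySem.Set.contains]
  rw [hadd, foldl_add_all_eq v l h]

theorem two_mem_length {α : Type} (l : List α) (a b : α) (ha : a ∈ l) (hb : b ∈ l)
    (hab : a ≠ b) : 2 ≤ l.length := by
  match l with
  | [] => cases ha
  | [x] =>
    simp at ha hb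
    exact absurd (ha.trans hb.symm) hab
  | x :: y :: xs => simp only [List.length_cons]; omega

theorem check_five_of_a_kind_spec : Claim_equal_check_five_of_a_kind := by
  intro hand _
  show check_five_of_a_kind hand = check_five_of_a_kind_alt hand
  have hA : check_five_of_a_kind hand
      = (if PySem.List.sorted (PySem.Dict.counter (hand.map (fun i => i.1))).values
            (fun x => x) false = [(5 : Int)] then true else false) := rfl
  rw [hA]
  match hand with
  | [] => rfl
  | h :: t =>
    show _ = ((h :: t).length == 5 && (h :: t).all fun c => c.1 == h.1)
    by_cases hall : ∀ c ∈ t, c.1 = h.1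
    · -- all values equal: the counter has the single entry (h.1, t.length + 1)
      have hset : PySem.Set.ofList ((h :: t).map (fun i => i.1)) = [h.1] :=
        ofList_all_eq _ _ (by
          intro x hx
          obtain ⟨c, hc, rfl⟩ := List.mem_map.mp hx
          exact hall c hc)
      have hcount : List.count h.1 (t.map (fun i => i.1)) = t.length := by
        have hall' : ∀ b ∈ t.map (fun i => i.1), h.1 = b := by
          intro b hb
          obtain ⟨c, hc, rfl⟩ := List.mem_map.mp hb
          exact (hall c hc).symm
        rw [List.count_eq_length.mpr hall']
        simp
      have hvalues : (PySem.Dict.counter ((h :: t).map (fun i => i.1))).values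
          = [((t.length + 1 : Nat) : Int)] := by
        simp only [PySem.Dict.values, PySem.Dict.items_counter, hset, List.map_map]
        simp [hcount]
      rw [hvalues]
      have hsorted : PySem.List.sorted [((t.length + 1 : Nat) : Int)] (fun x => x) false
          = [((t.length + 1 : Nat) : Int)] := rfl
      rw [hsorted]
      have hallb : ((h :: t).all fun c => c.1 == h.1) = true := by
        rw [List.all_eq_true]
        intro c hc
        rcases List.mem_cons.mp hc with hc | hc
        · simp [hc]
        · simp [hall c hc]
      have htall : (t.all fun c => c.1 == h.1) = true := by
        rw [List.all_eq_true]; intro c hc; simp [hall c hc]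
      by_cases h5 : t.length = 4
      · have hi : ((t.length : Int) + 1 = 5) := by omega
        simp [h5, htall]
      · have hi : ¬ ((t.length : Int) + 1 = 5) := by omega
        have h4 : (t.length == 4) = false := by simp [h5]
        simp [hi, h4]
    · -- some value differs from the first: at least two distinct counter keys
      rw [not_forall] at hall; simp only [not_forall, exists_prop] at hall
      obtain ⟨c, hc, hne⟩ := hall
      have hmem1 : h.1 ∈ PySem.Set.ofList ((h :: t).map (fun i => i.1)) := by
        rw [PySem.Set.mem_ofList]; exact List.mem_map.mpr ⟨h, by simp, rfl⟩
      have hmem2 : c.1 ∈ PySem.Set.ofList ((h :: t).map (fun i => i.1)) := by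
        rw [PySem.Set.mem_ofList]; exact List.mem_map.mpr ⟨c, by simp [hc], rfl⟩
      have hlen : 2 ≤ (PySem.Set.ofList ((h :: t).map (fun i => i.1))).length :=
        two_mem_length _ _ _ hmem1 hmem2 (fun he => hne he.symm)
      have hvlen : (PySem.List.sorted
          (PySem.Dict.counter ((h :: t).map (fun i => i.1))).values (fun x => x) false).length
          = (PySem.Set.ofList ((h :: t).map (fun i => i.1))).length := by
        rw [PySem.List.length_sorted]
        simp [PySem.Dict.values, PySem.Dict.items_counter]
      have hAne : ¬ (PySem.List.sorted
          (PySem.Dict.counter ((h :: t).map (fun i => i.1))).values (fun x => x) false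
          = [(5 : Int)]) := by
        intro hx
        have h2 : 2 ≤ (PySem.List.sorted
            (PySem.Dict.counter ((h :: t).map (fun i => i.1))).values (fun x => x) false).length :=
          hvlen ▸ hlen
        rw [hx] at h2
        simp at h2
      have hallb : ((h :: t).all fun x => x.1 == h.1) = false := by
        rw [List.all_eq_false]
        exact ⟨c, List.mem_cons_of_mem _ hc, by simpa using hne⟩
      rw [if_neg hAne, hallb, Bool.and_false]
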